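-- pv_equiv track=rewrite | github.com/SachinKonan/AutoReviewer | lib/schemas.py | _extract_reviewer_id
-- ===== SOURCE A (Python) =====
-- from typing import Optional, List, Any, Dict, Type, Union
--
-- def _extract_reviewer_id(signatures: List[str]) -> Optional[str]:
--     """
--     Extract reviewer identifier from signatures.
--
--     Examples:
--         ['ICLR.cc/2020/Conference/Paper1130/AnonReviewer3'] -> 'AnonReviewer3'
--         ['ICLR.cc/2024/Conference/Submission1909/Reviewer_AG4r'] -> 'Reviewer_AG4r'
--     """
--     if not signatures:
--         return None
--     sig = signatures[0]
--     parts = sig.split('/')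
--     for part in reversed(parts):
--         if 'Reviewer' in part or 'AnonReviewer' in part:
--             return part
--     return None
-- ===== SOURCE B (Python) =====
-- def _extract_reviewer_id(signatures):
--     """One forward pass over the first signature: accumulate the current
--     '/'-segment and remember the most recent segment containing 'Reviewer'
--     (which subsumes 'AnonReviewer'); no split, no reversal."""
--     if not signatures:
--         return None
--     best = None
--     cur = ''
--     for ch in signatures[0]:
--         if ch == '/':
--             if 'Reviewer' in cur:
--                 best = cur
--             cur = ''
--         else:
--             cur += ch
--     if 'Reviewer' in cur:
--         best = cur
--     return best
-- ===== Notes on version B (the rewrite author's own statement) =====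
-- stated objective: alternative
-- what changed: B makes one forward pass over the first signature's characters with a (current-segment, best-so-far) accumulator instead of A's split('/') followed by a reversed scan, and drops the redundant 'AnonReviewer' test since 'Reviewer' subsumes it.
import Mathlib
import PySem

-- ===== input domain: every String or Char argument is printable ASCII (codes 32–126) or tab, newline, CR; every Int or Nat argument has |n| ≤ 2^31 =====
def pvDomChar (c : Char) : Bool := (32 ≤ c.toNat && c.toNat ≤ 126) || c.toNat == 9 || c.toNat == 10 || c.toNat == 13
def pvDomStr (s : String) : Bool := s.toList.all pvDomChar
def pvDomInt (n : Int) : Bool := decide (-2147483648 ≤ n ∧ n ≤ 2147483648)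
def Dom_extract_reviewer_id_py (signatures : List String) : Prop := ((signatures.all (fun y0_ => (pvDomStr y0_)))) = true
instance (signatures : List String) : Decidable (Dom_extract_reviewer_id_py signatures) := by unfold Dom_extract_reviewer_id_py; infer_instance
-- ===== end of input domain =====

-- B replaces A's split('/') + reversed scan by a single forward pass that accumulates the
-- current '/'-segment and remembers the last segment containing 'Reviewer' (alternative decomposition, same cost).


-- ===== PORT A =====
-- "'Reviewer' in part or 'AnonReviewer' in part"
def pvCondA (part : String) : Bool :=
  PySem.Str.isIn "Reviewer" part || PySem.Str.isIn "AnonReviewer" part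

-- "for part in reversed(parts): if …: return part" then "return None"; applied to parts.reverse
def pvLoopA : List String → Option String
  | [] => none
  | p :: rest => if pvCondA p then some p else pvLoopA rest

def extract_reviewer_id_py (signatures : List String) : Option String :=
  match signatures with
  | [] => none
  | sig :: _ =>
    -- sig.split('/'): the separator "/" is nonempty, so Python never raises; PySem.Chars.splitOn is exactly that split
    let parts : List String := (PySem.Chars.splitOn sig.toList "/".toList).map String.ofList
    pvLoopA parts.reverse

-- ===== PORT B =====
-- "'Reviewer' in cur"
def pvCondB (cur : List Char) : Bool := PySem.Chars.isIn "Reviewer".toList cur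

-- B's for-loop over the characters, state (cur, best); on '/' flush cur, else append ch;
-- the [] case is the final flush after the loop ("if 'Reviewer' in cur: best = cur")
def pvLoopB : List Char → List Char → Option (List Char) → Option (List Char)
  | [], cur, best => if pvCondB cur then some cur else best
  | c :: cs, cur, best =>
    if c = '/' then pvLoopB cs [] (if pvCondB cur then some cur else best)
    else pvLoopB cs (cur ++ [c]) best

def extract_reviewer_id_py_alt (signatures : List String) : Option String :=
  match signatures with
  | [] => none
  | sig :: _ => (pvLoopB sig.toList [] none).map String.ofList

-- ===== PRECONDITION & SPEC =====
def Spec_extract_reviewer_id_py (signatures : List String) (out : Option String) : Prop := out = extract_reviewer_id_py_alt signatures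
instance (signatures : List String) (out : Option String) : Decidable (Spec_extract_reviewer_id_py signatures out) := by unfold Spec_extract_reviewer_id_py; infer_instance

-- ===== CLAIM (what is proved, stated in full; the proofs are below) =====
def Claim_equal_extract_reviewer_id_py : Prop := ∀ (signatures : List String), Dom_extract_reviewer_id_py signatures → Spec_extract_reviewer_id_py signatures (extract_reviewer_id_py signatures)

-- ===== LEMMAS AND PROOFS =====

-- reference splitter: s.split('/') as a plain structural recursion
def pvSplit : List Char → List (List Char)
  | [] => [[]]
  | c :: cs =>
    if c = '/' then [] :: pvSplit cs
    else
      match pvSplit cs with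
      | [] => [[c]]
      | h :: t => (c :: h) :: t

def pvPrepend (p : List Char) : List (List Char) → List (List Char)
  | [] => [p]
  | h :: t => (p ++ h) :: t

theorem pvSplit_ne_nil (cs : List Char) : pvSplit cs ≠ [] := by
  cases cs with
  | nil => simp [pvSplit]
  | cons c cs =>
    simp only [pvSplit]
    split
    · simp
    · split <;> simp

theorem pvGo_eq (fuel : Nat) : ∀ (l cur : List Char) (acc : List (List Char)) (_ : l.length ≤ fuel),
    PySem.Chars.splitOn.go ['/'] fuel l cur acc = acc.reverse ++ pvPrepend cur.reverse (pvSplit l) := by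
  induction fuel with
  | zero =>
    intro l cur acc h
    have hl : l = [] := by cases l <;> simp_all
    subst hl
    simp [PySem.Chars.splitOn.go, pvSplit, pvPrepend]
  | succ f ih =>
    intro l cur acc h
    cases l with
    | nil => simp [PySem.Chars.splitOn.go, pvSplit, pvPrepend]
    | cons c rest =>
      by_cases hc : c = '/'
      · subst hc
        rw [show PySem.Chars.splitOn.go ['/'] (f+1) ('/' :: rest) cur acc
              = PySem.Chars.splitOn.go ['/'] f (List.drop 1 ('/' :: rest)) [] (cur.reverse :: acc) from by
              simp [PySem.Chars.splitOn.go, List.isPrefixOf]]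
        simp only [List.drop_succ_cons, List.drop_zero]
        rw [ih rest [] (cur.reverse :: acc) (by simpa using Nat.le_of_succ_le_succ (by simpa using h))]
        simp only [pvSplit, if_true]
        cases hs : pvSplit rest with
        | nil => exact absurd hs (pvSplit_ne_nil rest)
        | cons hh tt => simp [pvPrepend]
      · rw [show PySem.Chars.splitOn.go ['/'] (f+1) (c :: rest) cur acc
              = PySem.Chars.splitOn.go ['/'] f rest (c :: cur) acc from by
              simp only [PySem.Chars.splitOn.go]
              rw [if_neg]
              simp [List.isPrefixOf]
              intro h'
              exact absurd h'.symm hc]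
        rw [ih rest (c :: cur) acc (by simpa using Nat.le_of_succ_le_succ (by simpa using h))]
        simp only [pvSplit, if_neg hc]
        cases hs : pvSplit rest with
        | nil => exact absurd hs (pvSplit_ne_nil rest)
        | cons hh tt => simp [pvPrepend]

theorem pvSplitOn_eq (cs : List Char) : PySem.Chars.splitOn cs "/".toList = pvSplit cs := by
  show PySem.Chars.splitOn.go _ _ _ _ _ = _
  rw [show ("/".toList) = ['/'] from rfl]
  rw [pvGo_eq (cs.length + 1) cs [] [] (by omega)]
  cases hs : pvSplit cs with
  | nil => exact absurd hs (pvSplit_ne_nil cs)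
  | cons h t => simp [pvPrepend]

-- 'Reviewer' is a substring of 'AnonReviewer', so A's second test is subsumed by the first
theorem pvCond_eq (p : List Char) : pvCondA (String.ofList p) = pvCondB p := by
  simp only [pvCondA, pvCondB, PySem.Str.isIn_eq, String.toList_ofList]
  cases hR : PySem.Chars.isIn "Reviewer".toList p with
  | true => simp
  | false =>
    simp only [Bool.false_or]
    rw [PySem.Chars.isIn_eq_false_iff] at hR ⊢
    intro hAR
    exact hR ((show "Reviewer".toList <:+: "AnonReviewer".toList by decide).trans hAR)

theorem pvLoopA_eq (l : List (List Char)) :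
    pvLoopA (l.map String.ofList) = (l.find? pvCondB).map String.ofList := by
  induction l with
  | nil => rfl
  | cons p t ih =>
    simp only [List.map_cons, pvLoopA, List.find?_cons, pvCond_eq]
    cases hp : pvCondB p <;> simp [ih]

-- loop invariant of B: cur is the pending prefix of the current segment, best the fallback
theorem pvLoopB_eq (cs : List Char) : ∀ (cur : List Char) (best : Option (List Char)),
    pvLoopB cs cur best =
      match (pvPrepend cur (pvSplit cs)).reverse.find? pvCondB with
      | some x => some x
      | none => best := by
  induction cs with
  | nil =>
    intro cur best
    simp [pvLoopB, pvSplit, pvPrepend]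
    cases hc : pvCondB cur <;> simp
  | cons c rest ih =>
    intro cur best
    by_cases hc : c = '/'
    · subst hc
      rw [show pvLoopB ('/' :: rest) cur best
            = pvLoopB rest [] (if pvCondB cur then some cur else best) from by simp [pvLoopB]]
      rw [ih]
      rw [show pvSplit ('/' :: rest) = [] :: pvSplit rest from by simp [pvSplit]]
      have hpre : ∀ s : List (List Char), s ≠ [] → pvPrepend ([] : List Char) s = s := by
        intro s hs; cases s with
        | nil => exact absurd rfl hs
        | cons a b => simp [pvPrepend]
      rw [hpre _ (pvSplit_ne_nil rest)]
      have : pvPrepend cur ([] :: pvSplit rest) = cur :: pvSplit rest := by simp [pvPrepend]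
      rw [this]
      simp only [List.reverse_cons, List.find?_append]
      cases hfront : (pvSplit rest).reverse.find? pvCondB with
      | some x => simp
      | none =>
        simp only [Option.none_or, List.find?_cons, List.find?_nil]
        cases hcur : pvCondB cur <;> simp
    · simp only [pvLoopB, if_neg hc, ih]
      simp only [pvSplit, if_neg hc]
      cases hs : pvSplit rest with
      | nil => exact absurd hs (pvSplit_ne_nil rest)
      | cons hh tt => simp [pvPrepend]

-- ===== VERDICT (by name: the statement is the Claim_ definition above) =====
theorem extract_reviewer_id_py_spec : Claim_equal_extract_reviewer_id_py := by
  intro signatures _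
  unfold Spec_extract_reviewer_id_py
  cases signatures with
  | nil => rfl
  | cons sig rest =>
    show pvLoopA _ = (pvLoopB sig.toList [] none).map String.ofList
    rw [pvSplitOn_eq, ← List.map_reverse, pvLoopA_eq, pvLoopB_eq]
    have hpre : pvPrepend ([] : List Char) (pvSplit sig.toList) = pvSplit sig.toList := by
      cases hs : pvSplit sig.toList with
      | nil => exact absurd hs (pvSplit_ne_nil _)
      | cons a b => simp [pvPrepend]
    rw [hpre]
    cases hf : (pvSplit sig.toList).reverse.find? pvCondB <;> simp
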